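-- pv_equiv track=rewrite | github.com/soupedrocampos/tib-bolsa-de-valores | fix_inline_r2.py | fix_cl_items
-- ===== SOURCE A (Python) =====
-- def fix_cl_items(content):
--     """Replace anonymous cl-item divs (font-size:20.0px list items)."""
--     count = 0
--     old = "<div style=font-size:20.0px;color:var(--white);letter-spacing:2px>"
--     new = "<div class=cl-item>"
--     while old in content:
--         content = content.replace(old, new)
--         count += 1
--     return content, count
-- ===== SOURCE B (Python) =====
-- def fix_cl_items(content):
--     """Replace anonymous cl-item divs (font-size:20.0px list items)."""
--     old = "<div style=font-size:20.0px;color:var(--white);letter-spacing:2px>"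
--     new = "<div class=cl-item>"
--     if old not in content:
--         return content, 0
--     return content.replace(old, new), 1
-- ===== Notes on version B (the rewrite author's own statement) =====
-- stated objective: simpler
-- what changed: The while loop is replaced by a single membership test plus one replace: since the replacement string cannot overlap the pattern at any offset, one replace removes every occurrence, so the loop body runs at most once and count is 0 or 1.
import Mathlib
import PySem

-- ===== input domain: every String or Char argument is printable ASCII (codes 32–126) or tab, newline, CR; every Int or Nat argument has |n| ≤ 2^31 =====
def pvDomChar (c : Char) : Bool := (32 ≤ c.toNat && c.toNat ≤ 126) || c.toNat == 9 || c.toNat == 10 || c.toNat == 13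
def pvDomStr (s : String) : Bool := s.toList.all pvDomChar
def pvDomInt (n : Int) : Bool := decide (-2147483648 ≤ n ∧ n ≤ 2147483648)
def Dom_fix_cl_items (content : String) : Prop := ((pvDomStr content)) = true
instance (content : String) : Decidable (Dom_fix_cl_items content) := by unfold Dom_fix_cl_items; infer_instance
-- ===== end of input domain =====

-- B replaces A's while loop by one membership test + one replace: the replacement text
-- cannot overlap the pattern at any offset, so the loop body can only ever run once.

-- the two string literals of the Python source (shared by both ports)
def pvOldStr : String := "<div style=font-size:20.0px;color:var(--white);letter-spacing:2px>"
def pvNewStr : String := "<div class=cl-item>"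

-- ===== PORT A =====
-- A's 'while old in content' loop; the fuel argument only makes the recursion total.
def fixWhile (fuel : Nat) (content : String) (count : Int) : String × Int :=
  match fuel with
  | 0 => (content, count)
  | f + 1 =>
      if PySem.Str.isIn pvOldStr content then
        fixWhile f (PySem.Str.replace content pvOldStr pvNewStr) (count + 1)
      else (content, count)

def fix_cl_items (content : String) : String × Int :=
  fixWhile (content.toList.length + 1) content 0

-- ===== PORT B =====
def fix_cl_items_alt (content : String) : String × Int :=
  if PySem.Str.isIn pvOldStr content = false then (content, 0)
  else (PySem.Str.replace content pvOldStr pvNewStr, 1)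

-- ===== PRECONDITION & SPEC =====
def Spec_fix_cl_items (content : String) (out : String × Int) : Prop := out = fix_cl_items_alt content
instance (content : String) (out : String × Int) : Decidable (Spec_fix_cl_items content out) := by unfold Spec_fix_cl_items; infer_instance

-- ===== CLAIM (what is proved, stated in full; the proofs are below) =====
def Claim_equal_fix_cl_items : Prop := ∀ (content : String), Dom_fix_cl_items content → Spec_fix_cl_items content (fix_cl_items content)

-- ===== LEMMAS AND PROOFS =====

def oldL : List Char := pvOldStr.toList
def newL : List Char := pvNewStr.toList

set_option maxRecDepth 10000 in
lemma oldL_len : oldL.length = 66 := by decide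

set_option maxRecDepth 10000 in
lemma newL_len : newL.length = 19 := by decide

-- straight (non-tail-recursive) form of Python's str.replace scan
def rep : List Char → List Char
  | [] => []
  | c :: t =>
      if oldL.isPrefixOf (c :: t) then newL ++ rep (t.drop (oldL.length - 1))
      else c :: rep t
  termination_by l => l.length
  decreasing_by
    · simp
    · simp

-- the two literal facts the argument rests on: no placement of oldL overlapping an
-- inserted copy of newL matches newL's characters (checked exhaustively over offsets)
set_option maxRecDepth 100000 in
lemma factA : ∀ i, i < 19 → ¬ (oldL.take (19 - i) <+: newL.drop i) := by decide

set_option maxRecDepth 100000 in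
lemma factB : ∀ j, j < 66 → 0 < j → ¬ ((oldL.drop j).take 19 <+: newL) := by decide

lemma prefix_take_of_prefix {p X : List Char} (h : p <+: X) (n : Nat) :
    p.take n <+: X := (List.take_prefix n p).trans h

lemma prefix_append_left {p A B : List Char} (h : p <+: A ++ B) (hl : p.length ≤ A.length) :
    p <+: A := by
  rw [List.prefix_iff_eq_take] at h
  rw [List.take_append_of_le_length hl] at h
  exact h ▸ List.take_prefix _ A

lemma drop_append_ge (A B : List Char) (n : Nat) (h : A.length ≤ n) :
    (A ++ B).drop n = B.drop (n - A.length) := by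
  rw [List.drop_append]; simp [List.drop_eq_nil_of_le h]

-- a prefix of newL ++ X of length ≤ 19 that equals a chunk of oldL is impossible (factB)
lemma no_old_chunk_prefix {X : List Char} (j : Nat) (hj0 : 0 < j) (hj : j < 66)
    (h : oldL.drop j <+: newL ++ X) : False := by
  have h1 : (oldL.drop j).take newL.length <+: newL :=
    prefix_append_left (prefix_take_of_prefix h newL.length)
      (by simp)
  rw [newL_len] at h1
  exact factB j hj hj0 h1

-- residual occurrences in rep s trace back to a prefix of the input
lemma rep_T : ∀ (n : Nat) (s : List Char), s.length ≤ n → ∀ j, 0 < j → j < 66 →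
    oldL.drop j <+: rep s → oldL.drop j <+: s := by
  intro n
  induction n with
  | zero =>
      intro s hs j hj0 hj hpre
      have hnil : s = [] := List.eq_nil_of_length_eq_zero (Nat.le_zero.mp hs)
      subst hnil
      rw [rep] at hpre
      have := List.prefix_nil.mp hpre
      have hlen : (oldL.drop j).length = 66 - j := by rw [List.length_drop, oldL_len]
      rw [this] at hlen
      simp at hlen
      omega
  | succ n ih =>
      intro s hs j hj0 hj hpre
      cases s with
      | nil =>
          rw [rep] at hpre
          have := List.prefix_nil.mp hpre
          have hlen : (oldL.drop j).length = 66 - j := by rw [List.length_drop, oldL_len]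
          rw [this] at hlen
          simp at hlen
          omega
      | cons c t =>
          by_cases hm : oldL.isPrefixOf (c :: t)
          · rw [rep, if_pos hm] at hpre
            exact absurd hpre (fun h => no_old_chunk_prefix j hj0 hj h)
          · rw [rep, if_neg hm] at hpre
            have hjlt : j < oldL.length := by rw [oldL_len]; omega
            rw [List.drop_eq_getElem_cons hjlt, List.cons_prefix_cons] at hpre
            obtain ⟨hc, htail⟩ := hpre
            rw [List.drop_eq_getElem_cons hjlt, hc, List.cons_prefix_cons]
            refine ⟨rfl, ?_⟩
            by_cases hj65 : j + 1 < 66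
            · exact ih t (by simpa using Nat.lt_succ_iff.mp (Nat.lt_of_lt_of_le (Nat.lt_succ_self _) hs)) (j + 1) (by omega) hj65 htail
            · have h66 : j + 1 = 66 := by omega
              have hdrop : oldL.drop (j + 1) = [] :=
                List.drop_eq_nil_of_le (by rw [oldL_len, h66])
              rw [hdrop]
              exact List.nil_prefix

-- oldL never occurs in the output of the scan
lemma rep_noInfix : ∀ (n : Nat) (s : List Char), s.length ≤ n → ¬ oldL <:+: rep s := by
  intro n
  induction n with
  | zero =>
      intro s hs hinf
      have hnil : s = [] := List.eq_nil_of_length_eq_zero (Nat.le_zero.mp hs)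
      subst hnil
      rw [rep] at hinf
      have h := List.infix_nil.mp hinf
      have h0 : oldL.length = 0 := by rw [h]; rfl
      rw [oldL_len] at h0
      omega
  | succ n ih =>
      intro s hs hinf
      cases s with
      | nil =>
          rw [rep] at hinf
          have := List.infix_nil.mp hinf
          have : oldL.length = 0 := by rw [this]; rfl
          rw [oldL_len] at this
          omega
      | cons c t =>
          have hts : t.length ≤ n := by simpa using hs
          by_cases hm : oldL.isPrefixOf (c :: t)
          · rw [rep, if_pos hm] at hinf
            set r := t.drop (oldL.length - 1) with hr
            obtain ⟨u, hpu, hsu⟩ := List.infix_iff_prefix_suffix.mp hinf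
            rw [List.suffix_iff_eq_drop] at hsu
            set k := (newL ++ rep r).length - u.length with hk
            rw [hsu] at hpu
            by_cases hklt : k < newL.length
            · rw [List.drop_append_of_le_length (le_of_lt hklt)] at hpu
              have h1 : oldL.take (newL.drop k).length <+: newL.drop k :=
                prefix_append_left (prefix_take_of_prefix hpu _) (by simp)
              have h2 : (newL.drop k).length = 19 - k := by rw [List.length_drop, newL_len]
              rw [h2] at h1
              rw [newL_len] at hklt
              exact factA k hklt h1
            · rw [drop_append_ge _ _ _ (not_lt.mp hklt)] at hpu
              have hinf' : oldL <:+: rep r :=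
                List.infix_iff_prefix_suffix.mpr ⟨_, hpu, List.drop_suffix _ _⟩
              have hrlen : r.length ≤ n :=
                le_trans (by rw [hr, List.length_drop]; omega) hts
              exact ih r hrlen hinf'
          · rw [rep, if_neg hm] at hinf
            rcases List.infix_cons_iff.mp hinf with hp | hinf'
            · have h0 : 0 < oldL.length := by rw [oldL_len]; omega
              have hold : oldL = oldL[0] :: oldL.drop 1 := by
                simpa using List.drop_eq_getElem_cons h0
              rw [hold, List.cons_prefix_cons] at hp
              obtain ⟨hc, h1⟩ := hp
              have h2 : oldL.drop 1 <+: t :=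
                rep_T t.length t (le_refl _) 1 Nat.one_pos (by omega) h1
              have : oldL <+: c :: t := by
                rw [hold, hc, List.cons_prefix_cons]
                exact ⟨rfl, h2⟩
              exact hm (List.isPrefixOf_iff_prefix.mpr this)
            · exact ih t hts hinf'

lemma go_eq (fuel : Nat) : ∀ (l acc : List Char), l.length ≤ fuel →
    PySem.Chars.replace.go oldL newL fuel l acc = acc.reverse ++ rep l := by
  induction fuel with
  | zero =>
      intro l acc hl
      have hnil : l = [] := List.eq_nil_of_length_eq_zero (Nat.le_zero.mp hl)
      subst hnil
      rw [PySem.Chars.replace.go, rep]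
  | succ f ih =>
      intro l acc hl
      cases l with
      | nil =>
          rw [PySem.Chars.replace.go, rep]
          all_goals simp
      | cons c t =>
          rw [PySem.Chars.replace.go, rep]
          by_cases hm : oldL.isPrefixOf (c :: t)
          · rw [if_pos hm, if_pos hm]
            have h66 : oldL.length = 65 + 1 := by rw [oldL_len]
            have hdrop : (c :: t).drop oldL.length = t.drop (oldL.length - 1) := by
              rw [h66, List.drop_succ_cons]
            have hlen2 : (t.drop (oldL.length - 1)).length ≤ f := by
              rw [List.length_drop]
              have ht : t.length ≤ f := by simpa using hl
              omega
            rw [hdrop, ih _ _ hlen2]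
            simp
          · rw [if_neg hm, if_neg hm]
            rw [ih t (c :: acc) (by simpa using hl)]
            simp

lemma replace_noIn (s : List Char) :
    PySem.Chars.isIn oldL (PySem.Chars.replace s oldL newL) = false := by
  rw [PySem.Chars.isIn_eq_false_iff, PySem.Chars.replace,
    if_neg (by rw [show oldL.isEmpty = false from rfl]; simp)]
  rw [go_eq s.length s [] (le_refl _)]
  simpa using rep_noInfix s.length s (le_refl _)

lemma str_noIn (s : String) :
    PySem.Str.isIn pvOldStr (PySem.Str.replace s pvOldStr pvNewStr) = false := by
  rw [PySem.Str.isIn_eq, PySem.Str.toList_replace]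
  exact replace_noIn s.toList

-- ===== VERDICT (by name: the statement is the Claim_ definition above) =====
theorem fix_cl_items_spec : Claim_equal_fix_cl_items := by
  intro content _
  unfold Spec_fix_cl_items fix_cl_items fix_cl_items_alt
  rw [fixWhile]
  by_cases hin : PySem.Str.isIn pvOldStr content
  · rw [if_pos hin, if_neg (by rw [hin]; simp)]
    have hinL : PySem.Chars.isIn pvOldStr.toList content.toList = true := by
      rw [← PySem.Str.isIn_eq]; exact hin
    have hlen : 66 ≤ content.toList.length := by
      have h1 : oldL <:+: content.toList := (PySem.Chars.isIn_iff_infix _ _).mp hinL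
      have h2 := h1.length_le
      rw [oldL_len] at h2
      exact h2
    obtain ⟨k, hk⟩ : ∃ k, content.toList.length = k + 1 :=
      ⟨content.toList.length - 1, by omega⟩
    rw [hk, fixWhile, if_neg (by rw [str_noIn]; simp)]
    norm_num
  · rw [if_neg hin, if_pos (by simpa using hin)]
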